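-- pv_equiv track=rewrite | github.com/andrasfe/specter | specter/llm_review.py | _format_window
-- ===== SOURCE A (Python) =====
-- from typing import Iterable
--
-- def _format_window(
--     src_lines: list[str],
--     line_numbers: Iterable[int],
--     radius: int = 8,
-- ) -> str:
--     """Render an annotated window around the given lines for the prompt.
--
--     Returns a string of the form::
--
--         00120: ...some line of context...
--         00121: ...some line of context...
--         00122: <-- proposed change ->  PIC X(2) VALUE 'A'.
--         00123: ...some line of context...
--
--     so the challenger can see what the surrounding code looked like.
--     """
--     if not src_lines:
--         return "(empty source)"
--     targets = sorted(set(int(n) for n in line_numbers if int(n) > 0))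
--     if not targets:
--         return "(no target lines)"
--
--     # Build a set of line indexes (0-based) we want to render.
--     visible: set[int] = set()
--     for ln in targets:
--         idx = ln - 1
--         for i in range(max(0, idx - radius), min(len(src_lines), idx + radius + 1)):
--             visible.add(i)
--
--     out: list[str] = []
--     last = -2
--     for i in sorted(visible):
--         if i > last + 1 and out:
--             out.append("...")
--         marker = "  " if (i + 1) not in targets else "*>"
--         text = src_lines[i].rstrip("\n")
--         out.append(f"{marker} {i + 1:5d}: {text}")
--         last = i
--     return "\n".join(out)
-- ===== SOURCE B (Python) =====
-- def _format_window(src_lines, line_numbers, radius=8):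
--     if not src_lines:
--         return "(empty source)"
--     targets = sorted(set(int(n) for n in line_numbers if int(n) > 0))
--     if not targets:
--         return "(no target lines)"
--     tset = set(targets)
--     n = len(src_lines)
--
--     # Merge each target's clamped window into disjoint, ordered intervals in one pass.
--     merged = []  # list of [lo, hi) half-open intervals
--     for ln in targets:
--         lo = max(0, ln - 1 - radius)
--         hi = min(n, ln + radius)
--         if lo >= hi:
--             continue
--         if merged and lo <= merged[-1][1]:
--             if hi > merged[-1][1]:
--                 merged[-1][1] = hi
--         else:
--             merged.append([lo, hi])
--
--     parts = []
--     for k, (lo, hi) in enumerate(merged):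
--         if k:
--             parts.append("...")
--         for i in range(lo, hi):
--             marker = "*>" if (i + 1) in tset else "  "
--             parts.append(f"{marker} {i + 1:5d}: {src_lines[i].rstrip(chr(10))}")
--     return "\n".join(parts)
-- ===== Notes on version B (the rewrite author's own statement) =====
-- stated objective: faster
-- what changed: B replaces A's per-index visible-set union plus sort of all visible indexes by a single pass that merges each sorted target's clamped window into disjoint intervals and renders them in order, emitting '...' between non-adjacent intervals.
import Mathlib
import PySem

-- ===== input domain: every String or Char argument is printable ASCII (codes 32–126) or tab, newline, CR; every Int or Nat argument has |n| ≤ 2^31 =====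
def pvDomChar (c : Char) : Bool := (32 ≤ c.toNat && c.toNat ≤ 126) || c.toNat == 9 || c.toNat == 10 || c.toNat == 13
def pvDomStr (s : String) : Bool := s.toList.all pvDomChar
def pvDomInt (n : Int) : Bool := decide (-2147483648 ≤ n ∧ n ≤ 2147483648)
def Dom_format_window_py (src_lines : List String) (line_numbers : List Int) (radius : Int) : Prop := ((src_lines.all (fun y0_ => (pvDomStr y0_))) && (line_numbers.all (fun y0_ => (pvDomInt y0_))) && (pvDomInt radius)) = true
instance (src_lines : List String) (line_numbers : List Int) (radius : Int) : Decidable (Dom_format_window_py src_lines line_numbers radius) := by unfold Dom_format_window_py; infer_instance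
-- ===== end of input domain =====

-- B is faster: it replaces A's per-index visible-set union and sort of all visible
-- indexes by a one-pass merge of the targets' clamped windows into disjoint intervals,
-- rendered in order with '...' between non-adjacent intervals.

-- shared rendering helpers (both Pythons use the identical f-string / rstrip("\n"))

-- s.rstrip("\n"): drop trailing newline characters (ported by hand, exact: only '\n' is stripped, from the right)
def pvRstripNL (s : String) : String := String.ofList ((s.toList.reverse.dropWhile (fun c => c == '\n')).reverse)

-- f"{m:5d}" for a nonnegative m: right-justify the decimal digits in width 5 with spaces (exact for 0 ≤ m)
def pvPad5 (m : Int) : List Char :=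
  let cs := PySem.Int.toChars m
  List.replicate (5 - cs.length) ' ' ++ cs

-- f"{marker} {i + 1:5d}: {text}" with marker decided by membership of i+1 in ts
def pvLine (src_lines : List String) (ts : List Int) (i : Int) : String :=
  let marker : List Char := if (i + 1) ∈ ts then ['*', '>'] else [' ', ' ']
  String.ofList (marker ++ [' '] ++ pvPad5 (i + 1) ++ [':', ' ']) ++ pvRstripNL (PySem.List.pyGetD src_lines i "")

-- targets = sorted(set(int(n) for n in line_numbers if int(n) > 0))  (shared line of both Pythons)
def pvTargets (line_numbers : List Int) : List Int :=
  PySem.List.sorted (PySem.Set.ofList (line_numbers.filter (fun nn => 0 < nn))) (fun x => x)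

-- ===== PORT A =====
-- A's visible-index set: every clamped window around a target, unioned index by index
def pvVisibleA (src_lines : List String) (radius : Int) (targets : List Int) : PySem.Set Int :=
  targets.foldl (fun vis ln =>
    (PySem.List.pyRange (max 0 ((ln - 1) - radius)) (min (src_lines.length : Int) ((ln - 1) + radius + 1))).foldl
      (fun v i => PySem.Set.add v i) vis) PySem.Set.empty

-- A's output loop over sorted(visible), carrying (out, last)
def pvOutA (src_lines : List String) (radius : Int) (targets : List Int) : List String × Int :=
  (PySem.List.sorted (pvVisibleA src_lines radius targets) (fun x => x)).foldl
    (fun (st : List String × Int) i =>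
      ((if st.2 + 1 < i ∧ st.1 ≠ [] then st.1 ++ ["..."] else st.1) ++ [pvLine src_lines targets i], i))
    ([], -2)

def format_window_py (src_lines : List String) (line_numbers : List Int) (radius : Int) : String :=
  if src_lines = [] then "(empty source)"
  else
    if pvTargets line_numbers = [] then "(no target lines)"
    else PySem.Str.join "\n" (pvOutA src_lines radius (pvTargets line_numbers)).1

-- ===== PORT B =====
-- one merge step: skip an empty window, extend the most recent interval when the new
-- window touches it (lo ≤ previous hi), otherwise open a new interval (list kept reversed)
def pvMergeStep (n radius : Int) (acc : List (Int × Int)) (ln : Int) : List (Int × Int) :=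
  let lo := max 0 (ln - 1 - radius)
  let hi := min n (ln + radius)
  if hi ≤ lo then acc
  else
    match acc with
    | [] => [(lo, hi)]
    | (plo, phi) :: rest =>
        if lo ≤ phi then (plo, max phi hi) :: rest
        else (lo, hi) :: (plo, phi) :: rest

-- the merged disjoint intervals, oldest first
def pvMergedB (n radius : Int) (targets : List Int) : List (Int × Int) :=
  (targets.foldl (pvMergeStep n radius) []).reverse

-- B's render loop: "..." before every interval but the first (enumerate index k ≠ 0)
def pvPartsB (src_lines : List String) (radius : Int) (targets : List Int) : List String :=
  (PySem.List.enumerate (pvMergedB (src_lines.length : Int) radius targets)).foldl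
    (fun (acc : List String) kiv =>
      (PySem.List.pyRange kiv.2.1 kiv.2.2).foldl
        (fun a i => a ++ [pvLine src_lines (PySem.Set.ofList targets) i])
        (if kiv.1 ≠ 0 then acc ++ ["..."] else acc)) []

def format_window_py_alt (src_lines : List String) (line_numbers : List Int) (radius : Int) : String :=
  if src_lines = [] then "(empty source)"
  else
    if pvTargets line_numbers = [] then "(no target lines)"
    else PySem.Str.join "\n" (pvPartsB src_lines radius (pvTargets line_numbers))

-- ===== PRECONDITION & SPEC =====
def Spec_format_window_py (src_lines : List String) (line_numbers : List Int) (radius : Int) (out : String) : Prop := out = format_window_py_alt src_lines line_numbers radius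
instance (src_lines : List String) (line_numbers : List Int) (radius : Int) (out : String) : Decidable (Spec_format_window_py src_lines line_numbers radius out) := by unfold Spec_format_window_py; infer_instance

-- ===== CLAIM (what is proved, stated in full; the proofs are below) =====
def Claim_equal_format_window_py : Prop := ∀ (src_lines : List String) (line_numbers : List Int) (radius : Int), Dom_format_window_py src_lines line_numbers radius → Spec_format_window_py src_lines line_numbers radius (format_window_py src_lines line_numbers radius)

-- ===== LEMMAS AND PROOFS =====

-- invariant of the reversed interval accumulator: intervals are nonempty, within [0,n],
-- and every earlier interval ends strictly before the head starts
def pvGoodRev (n : Int) : List (Int × Int) → Prop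
  | [] => True
  | (lo, hi) :: rest => 0 ≤ lo ∧ lo < hi ∧ hi ≤ n ∧ pvGoodRev n rest ∧ ∀ p ∈ rest, p.2 < lo

def pvMemIv (acc : List (Int × Int)) (x : Int) : Prop := ∃ p ∈ acc, p.1 ≤ x ∧ x < p.2

theorem pvMergeStep_inv (n radius : Int) (ts : List Int) :
    ∀ acc : List (Int × Int), ts.Pairwise (· < ·) → pvGoodRev n acc →
    (∀ p ∈ acc, ∀ ln ∈ ts, p.1 ≤ max 0 (ln - 1 - radius)) →
    pvGoodRev n (ts.foldl (pvMergeStep n radius) acc) ∧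
    (∀ x, pvMemIv (ts.foldl (pvMergeStep n radius) acc) x ↔
      pvMemIv acc x ∨ ∃ ln ∈ ts, max 0 (ln - 1 - radius) ≤ x ∧ x < min n (ln + radius)) := by
  induction ts with
  | nil => intro acc _ hg _; simpa using hg
  | cons ln rest ih =>
    intro acc hpw hg hlo
    rw [List.pairwise_cons] at hpw
    obtain ⟨hlt, hpw'⟩ := hpw
    set lov := max 0 (ln - 1 - radius) with hlov
    set hiv := min n (ln + radius) with hhiv
    have hstep : List.foldl (pvMergeStep n radius) acc (ln :: rest) =
        List.foldl (pvMergeStep n radius) (pvMergeStep n radius acc ln) rest := rfl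
    rw [hstep]
    by_cases hemp : hiv ≤ lov
    · have hacc : pvMergeStep n radius acc ln = acc := by
        simp [pvMergeStep, ← hlov, ← hhiv, hemp]
      rw [hacc]
      obtain ⟨g, m⟩ := ih acc hpw' hg (fun p hp ln' hln' => hlo p hp ln' (List.mem_cons_of_mem _ hln'))
      refine ⟨g, fun x => ?_⟩
      rw [m]
      constructor
      · rintro (h | h)
        · exact Or.inl h
        · exact Or.inr (by obtain ⟨l', hl', h2⟩ := h; exact ⟨l', List.mem_cons_of_mem _ hl', h2⟩)
      · rintro (h | ⟨l', hl', h2⟩)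
        · exact Or.inl h
        · rcases List.mem_cons.mp hl' with rfl | hl'
          · exact absurd h2 (by omega)
          · exact Or.inr ⟨l', hl', h2⟩
    · push_neg at hemp
      have hmono : ∀ ln' ∈ rest, lov ≤ max 0 (ln' - 1 - radius) := by
        intro ln' h; have := hlt ln' h; omega
      -- three shapes of the accumulator
      match acc, hg with
      | [], _ =>
        have hacc : pvMergeStep n radius [] ln = [(lov, hiv)] := by
          simp [pvMergeStep, ← hlov, ← hhiv, not_le.mpr hemp]
        rw [hacc]
        have hg' : pvGoodRev n [(lov, hiv)] := by
          refine ⟨by omega, hemp, by omega, trivial, by simp⟩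
        obtain ⟨g, m⟩ := ih [(lov, hiv)] hpw' hg' (by
          rintro p hp ln' hln'
          rcases List.mem_singleton.mp hp with rfl
          exact hmono ln' hln')
        refine ⟨g, fun x => ?_⟩
        rw [m]
        simp only [pvMemIv, List.not_mem_nil, List.mem_cons]
        constructor
        · rintro (⟨p, (rfl | hf), h2⟩ | ⟨l', hl', h2⟩)
          · exact Or.inr ⟨ln, Or.inl rfl, h2⟩
          · exact hf.elim
          · exact Or.inr ⟨l', Or.inr hl', h2⟩
        · rintro (⟨p, hp, _⟩ | ⟨l', (rfl | hl'), h2⟩)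
          · exact absurd hp (by simp)
          · exact Or.inl ⟨(lov, hiv), Or.inl rfl, h2⟩
          · exact Or.inr ⟨l', hl', h2⟩
      | (plo, phi) :: r, ⟨h0, h1, h2, h3, h4⟩ =>
        have hplo : plo ≤ lov := hlo (plo, phi) List.mem_cons_self ln List.mem_cons_self
        by_cases hm : lov ≤ phi
        · -- merge into the head interval
          have hacc : pvMergeStep n radius ((plo, phi) :: r) ln = (plo, max phi hiv) :: r := by
            simp [pvMergeStep, ← hlov, ← hhiv, not_le.mpr hemp, hm]
          rw [hacc]
          have hg' : pvGoodRev n ((plo, max phi hiv) :: r) := by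
            refine ⟨h0, by omega, by omega, h3, h4⟩
          obtain ⟨g, m⟩ := ih _ hpw' hg' (by
            rintro p hp ln' hln'
            rcases List.mem_cons.mp hp with rfl | hp
            · exact le_trans hplo (hmono ln' hln')
            · exact hlo p (List.mem_cons_of_mem _ hp) ln' (List.mem_cons_of_mem _ hln'))
          refine ⟨g, fun x => ?_⟩
          rw [m]
          simp only [pvMemIv, List.mem_cons]
          constructor
          · rintro (⟨p, (rfl | hp), hx⟩ | ⟨l', hl', hx⟩)
            · simp only at hx
              by_cases hxp : x < phi
              · exact Or.inl ⟨(plo, phi), Or.inl rfl, by omega⟩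
              · exact Or.inr ⟨ln, Or.inl rfl, by omega⟩
            · exact Or.inl ⟨p, Or.inr hp, hx⟩
            · exact Or.inr ⟨l', Or.inr hl', hx⟩
          · rintro (⟨p, (rfl | hp), hx⟩ | ⟨l', (rfl | hl'), hx⟩)
            · exact Or.inl ⟨(plo, max phi hiv), Or.inl rfl, by simp only at hx ⊢; omega⟩
            · exact Or.inl ⟨p, Or.inr hp, hx⟩
            · exact Or.inl ⟨(plo, max phi hiv), Or.inl rfl, by simp only; omega⟩
            · exact Or.inr ⟨l', hl', hx⟩
        · -- open a new interval
          push_neg at hm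
          have hacc : pvMergeStep n radius ((plo, phi) :: r) ln = (lov, hiv) :: (plo, phi) :: r := by
            simp [pvMergeStep, ← hlov, ← hhiv, not_le.mpr hemp, not_le.mpr hm]
          rw [hacc]
          have hg' : pvGoodRev n ((lov, hiv) :: (plo, phi) :: r) := by
            refine ⟨by omega, hemp, by omega, ⟨h0, h1, h2, h3, h4⟩, ?_⟩
            intro p hp
            rcases List.mem_cons.mp hp with rfl | hp
            · simpa using hm
            · have := h4 p hp; omega
          obtain ⟨g, m⟩ := ih _ hpw' hg' (by
            rintro p hp ln' hln'
            rcases List.mem_cons.mp hp with rfl | hp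
            · exact hmono ln' hln'
            · exact hlo p hp ln' (List.mem_cons_of_mem _ hln'))
          refine ⟨g, fun x => ?_⟩
          rw [m]
          simp only [pvMemIv, List.mem_cons]
          constructor
          · rintro (⟨p, (rfl | hp), hx⟩ | ⟨l', hl', hx⟩)
            · exact Or.inr ⟨ln, Or.inl rfl, hx⟩
            · exact Or.inl ⟨p, hp, hx⟩
            · exact Or.inr ⟨l', Or.inr hl', hx⟩
          · rintro (⟨p, hp, hx⟩ | ⟨l', (rfl | hl'), hx⟩)
            · exact Or.inl ⟨p, Or.inr hp, hx⟩
            · exact Or.inl ⟨(lov, hiv), Or.inl rfl, hx⟩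
            · exact Or.inr ⟨l', hl', hx⟩


-- forward facts extracted from the reversed-accumulator invariant
theorem pvGoodRev_bounds (n : Int) : ∀ acc : List (Int × Int), pvGoodRev n acc →
    ∀ p ∈ acc, 0 ≤ p.1 ∧ p.1 < p.2 ∧ p.2 ≤ n := by
  intro acc
  induction acc with
  | nil => intro _ p hp; exact absurd hp (List.not_mem_nil)
  | cons q rest ih =>
    obtain ⟨lo, hi⟩ := q
    rintro ⟨h0, h1, h2, h3, _⟩ p hp
    rcases List.mem_cons.mp hp with rfl | hp
    · exact ⟨h0, h1, h2⟩
    · exact ih h3 p hp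

theorem pvGoodRev_pairwise (n : Int) : ∀ acc : List (Int × Int), pvGoodRev n acc →
    acc.Pairwise (fun a b => b.2 < a.1) := by
  intro acc
  induction acc with
  | nil => intro _; exact List.Pairwise.nil
  | cons q rest ih =>
    obtain ⟨lo, hi⟩ := q
    rintro ⟨_, _, _, h3, h4⟩
    exact List.pairwise_cons.mpr ⟨fun p hp => h4 p hp, ih h3⟩

theorem pvFlat_pairwise (ms : List (Int × Int)) (h : ms.Pairwise (fun a b => a.2 < b.1)) :
    (ms.flatMap (fun p => PySem.List.pyRange p.1 p.2)).Pairwise (· < ·) := by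
  rw [List.pairwise_flatMap]
  refine ⟨fun a _ => PySem.List.pairwise_lt_pyRange_one _ _, ?_⟩
  refine h.imp ?_
  intro a b hab x hx y hy
  rw [PySem.List.mem_pyRange_one] at hx hy
  omega

theorem pvMem_flat (ms : List (Int × Int)) (x : Int) :
    x ∈ ms.flatMap (fun p => PySem.List.pyRange p.1 p.2) ↔ pvMemIv ms x := by
  simp [List.mem_flatMap, PySem.List.mem_pyRange_one, pvMemIv]

-- membership / nodup of the visible-index set built by nested Set.add folds
theorem pvVisible_mem (g : Int → List Int) (x : Int) : ∀ (ts : List Int) (init : PySem.Set Int),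
    (x ∈ ts.foldl (fun vis ln => (g ln).foldl (fun v i => PySem.Set.add v i) vis) init ↔
      x ∈ init ∨ ∃ ln ∈ ts, x ∈ g ln) := by
  intro ts
  induction ts with
  | nil => intro init; simp
  | cons ln rest ih =>
    intro init
    have hupd : (g ln).foldl (fun v i => PySem.Set.add v i) init = PySem.Set.update init (g ln) := rfl
    rw [List.foldl_cons, hupd, ih, PySem.Set.mem_update]
    constructor
    · rintro ((h | h) | ⟨l, hl, h⟩)
      · exact Or.inl h
      · exact Or.inr ⟨ln, List.mem_cons_self, h⟩
      · exact Or.inr ⟨l, List.mem_cons_of_mem _ hl, h⟩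
    · rintro (h | ⟨l, hl, h⟩)
      · exact Or.inl (Or.inl h)
      · rcases List.mem_cons.mp hl with rfl | hl
        · exact Or.inl (Or.inr h)
        · exact Or.inr ⟨l, hl, h⟩

theorem pvVisible_nodup (g : Int → List Int) : ∀ (ts : List Int) (init : PySem.Set Int),
    init.Nodup →
    (ts.foldl (fun vis ln => (g ln).foldl (fun v i => PySem.Set.add v i) vis) init).Nodup := by
  intro ts
  induction ts with
  | nil => intro init h; simpa using h
  | cons ln rest ih =>
    intro init h
    have hupd : (g ln).foldl (fun v i => PySem.Set.add v i) init = PySem.Set.update init (g ln) := rfl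
    rw [List.foldl_cons, hupd]
    exact ih _ (PySem.Set.nodup_update init (g ln) h)

-- A's render loop over one contiguous run: no "..." is emitted when the run starts
-- right after `last` (or the output is still empty), and `last` ends at the run's last index
theorem pvRunA (f : Int → String) : ∀ (k : Nat) (lo : Int) (out : List String) (last : Int),
    (lo ≤ last + 1 ∨ out = []) →
    (PySem.List.pyRange lo (lo + k + 1)).foldl
      (fun (st : List String × Int) i =>
        ((if st.2 + 1 < i ∧ st.1 ≠ [] then st.1 ++ ["..."] else st.1) ++ [f i], i)) (out, last)
      = (out ++ (PySem.List.pyRange lo (lo + k + 1)).map f, lo + k) := by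
  intro k
  induction k with
  | zero =>
    intro lo out last h
    have : lo + (0 : Nat) + 1 = lo + 1 := by push_cast; ring
    rw [this, PySem.List.pyRange_one_singleton]
    have hcond : ¬ (last + 1 < lo ∧ out ≠ []) := by
      rcases h with h | h
      · intro hc; omega
      · intro hc; exact hc.2 h
    simp only [List.foldl_cons, List.foldl_nil, List.map_cons, List.map_nil]
    rw [if_neg hcond]
    simp
  | succ k ih =>
    intro lo out last h
    have hlt : lo < lo + (k + 1 : Nat) + 1 := by push_cast; omega
    rw [PySem.List.pyRange_one_cons hlt]
    have hcond : ¬ (last + 1 < lo ∧ out ≠ []) := by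
      rcases h with h | h
      · intro hc; omega
      · intro hc; exact hc.2 h
    simp only [List.foldl_cons, List.map_cons]
    rw [if_neg hcond]
    have heq : lo + (k + 1 : Nat) + 1 = (lo + 1) + (k : Nat) + 1 := by push_cast; ring
    rw [heq, ih (lo + 1) (out ++ [f lo]) lo (Or.inl (by omega))]
    rw [Prod.mk.injEq]
    exact ⟨by simp, by push_cast; ring⟩

-- A's render loop over one block that starts after a gap: exactly one "..." is emitted first
theorem pvBlockA (f : Int → String) (k : Nat) (lo : Int) (out : List String) (last : Int)
    (hout : out ≠ []) (hgap : last + 1 < lo) :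
    (PySem.List.pyRange lo (lo + k + 1)).foldl
      (fun (st : List String × Int) i =>
        ((if st.2 + 1 < i ∧ st.1 ≠ [] then st.1 ++ ["..."] else st.1) ++ [f i], i)) (out, last)
      = (out ++ "..." :: (PySem.List.pyRange lo (lo + k + 1)).map f, lo + k) := by
  have hlt : lo < lo + (k : Nat) + 1 := by push_cast; omega
  rw [PySem.List.pyRange_one_cons hlt]
  simp only [List.foldl_cons, List.map_cons]
  rw [if_pos ⟨hgap, hout⟩]
  cases k with
  | zero =>
    have h0 : (lo + (0 : Nat) + 1 : Int) ≤ lo + 1 := by push_cast; omega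
    rw [PySem.List.pyRange_one_eq_nil h0]
    simp
  | succ k =>
    have heq : lo + (k + 1 : Nat) + 1 = (lo + 1) + (k : Nat) + 1 := by push_cast; ring
    rw [heq, pvRunA f k (lo + 1) ((out ++ ["..."]) ++ [f lo]) lo (Or.inl (by omega))]
    rw [Prod.mk.injEq]
    exact ⟨by simp, by push_cast; ring⟩

-- the same two lemmas stated with an arbitrary upper bound hi
theorem pvRunA2 (f : Int → String) (lo hi : Int) (out : List String) (last : Int)
    (hlt : lo < hi) (h : lo ≤ last + 1 ∨ out = []) :
    (PySem.List.pyRange lo hi).foldl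
      (fun (st : List String × Int) i =>
        ((if st.2 + 1 < i ∧ st.1 ≠ [] then st.1 ++ ["..."] else st.1) ++ [f i], i)) (out, last)
      = (out ++ (PySem.List.pyRange lo hi).map f, hi - 1) := by
  have hk : hi = lo + ((hi - lo - 1).toNat : Int) + 1 := by omega
  rw [hk, pvRunA f _ lo out last h, Prod.mk.injEq]
  exact ⟨rfl, by omega⟩

theorem pvBlockA2 (f : Int → String) (lo hi : Int) (out : List String) (last : Int)
    (hlt : lo < hi) (hout : out ≠ []) (hgap : last + 1 < lo) :
    (PySem.List.pyRange lo hi).foldl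
      (fun (st : List String × Int) i =>
        ((if st.2 + 1 < i ∧ st.1 ≠ [] then st.1 ++ ["..."] else st.1) ++ [f i], i)) (out, last)
      = (out ++ "..." :: (PySem.List.pyRange lo hi).map f, hi - 1) := by
  have hk : hi = lo + ((hi - lo - 1).toNat : Int) + 1 := by omega
  rw [hk, pvBlockA f _ lo out last hout hgap, Prod.mk.injEq]
  exact ⟨rfl, by omega⟩

-- last rendered index after a chain of blocks
def pvLastOf (ms : List (Int × Int)) (last : Int) : Int :=
  match ms.getLast? with
  | none => last
  | some p => p.2 - 1

-- the expected rendering: first block plain, every later block preceded by "..."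
def pvRender (f : Int → String) (ms : List (Int × Int)) : List String :=
  match ms with
  | [] => []
  | b :: rest =>
      (PySem.List.pyRange b.1 b.2).map f ++
        rest.flatMap (fun p => "..." :: (PySem.List.pyRange p.1 p.2).map f)

theorem pvChainA (f : Int → String) : ∀ (ms : List (Int × Int)) (out : List String) (last : Int),
    out ≠ [] → (∀ p ∈ ms, p.1 < p.2) → ms.Pairwise (fun a b => a.2 < b.1) →
    (∀ p ∈ ms.head?, last + 1 < p.1) →
    (ms.flatMap (fun p => PySem.List.pyRange p.1 p.2)).foldl
      (fun (st : List String × Int) i =>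
        ((if st.2 + 1 < i ∧ st.1 ≠ [] then st.1 ++ ["..."] else st.1) ++ [f i], i)) (out, last)
      = (out ++ ms.flatMap (fun p => "..." :: (PySem.List.pyRange p.1 p.2).map f), pvLastOf ms last) := by
  intro ms
  induction ms with
  | nil => intro out last _ _ _ _; simp [pvLastOf]
  | cons b rest ih =>
    intro out last hout hne hch hhd
    obtain ⟨lo, hi⟩ := b
    have hb : lo < hi := hne (lo, hi) List.mem_cons_self
    have hgap : last + 1 < lo := hhd (lo, hi) (by simp)
    rw [List.flatMap_cons, List.foldl_append]
    simp only
    rw [pvBlockA2 f lo hi out last hb hout hgap]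
    rw [List.pairwise_cons] at hch
    rw [ih (out ++ "..." :: (PySem.List.pyRange lo hi).map f) (hi - 1)
      (by simp)
      (fun p hp => hne p (List.mem_cons_of_mem _ hp))
      hch.2
      (by
        intro p hp
        have := hch.1 p (List.mem_of_mem_head? hp)
        simp only at this
        omega)]
    rw [Prod.mk.injEq]
    refine ⟨by simp, ?_⟩
    show pvLastOf rest (hi - 1) = pvLastOf ((lo, hi) :: rest) last
    cases rest with
    | nil => simp [pvLastOf]
    | cons c cs =>
      simp only [pvLastOf, List.getLast?_cons_cons]
      cases h : (c :: cs).getLast? with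
      | none => exact absurd h (by simp)
      | some p => rfl

theorem pvTopA (f : Int → String) (ms : List (Int × Int))
    (hne : ∀ p ∈ ms, p.1 < p.2) (hch : ms.Pairwise (fun a b => a.2 < b.1)) :
    ((ms.flatMap (fun p => PySem.List.pyRange p.1 p.2)).foldl
      (fun (st : List String × Int) i =>
        ((if st.2 + 1 < i ∧ st.1 ≠ [] then st.1 ++ ["..."] else st.1) ++ [f i], i)) ([], -2)).1
      = pvRender f ms := by
  cases ms with
  | nil => simp [pvRender]
  | cons b rest =>
    obtain ⟨lo, hi⟩ := b
    have hb : lo < hi := hne (lo, hi) List.mem_cons_self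
    rw [List.flatMap_cons, List.foldl_append]
    simp only
    rw [pvRunA2 f lo hi [] (-2) hb (Or.inr rfl)]
    rw [List.pairwise_cons] at hch
    rw [pvChainA f rest _ _
      (by
        intro hnil
        have hmm : lo ∈ PySem.List.pyRange lo hi := by
          rw [PySem.List.mem_pyRange_one]; omega
        rw [List.nil_append] at hnil
        exact absurd (List.mem_map_of_mem (f := f) hmm) (by rw [hnil]; simp))
      (fun p hp => hne p (List.mem_cons_of_mem _ hp))
      hch.2
      (by
        intro p hp
        have := hch.1 p (List.mem_of_mem_head? hp)
        simp only at this
        omega)]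
    simp [pvRender]

-- B's render loop: later blocks (enumerate index ≠ 0) are preceded by "..."
theorem pvBfold (f : Int → String) : ∀ (ms : List (Int × Int)) (s : Int) (acc : List String), 1 ≤ s →
    (PySem.List.enumerate ms s).foldl
      (fun (acc : List String) kiv =>
        (PySem.List.pyRange kiv.2.1 kiv.2.2).foldl (fun a i => a ++ [f i])
          (if kiv.1 ≠ 0 then acc ++ ["..."] else acc)) acc
      = acc ++ ms.flatMap (fun p => "..." :: (PySem.List.pyRange p.1 p.2).map f) := by
  intro ms
  induction ms with
  | nil => intro s acc _; rw [PySem.List.enumerate_nil]; simp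
  | cons p rest ih =>
    intro s acc hs
    rw [PySem.List.enumerate_cons, List.foldl_cons]
    simp only
    rw [if_pos (by omega : s ≠ 0), PySem.List.foldl_append_singleton_eq_map]
    rw [ih (s + 1) _ (by omega)]
    simp

theorem pvTopB (f : Int → String) (ms : List (Int × Int)) :
    (PySem.List.enumerate ms).foldl
      (fun (acc : List String) kiv =>
        (PySem.List.pyRange kiv.2.1 kiv.2.2).foldl (fun a i => a ++ [f i])
          (if kiv.1 ≠ 0 then acc ++ ["..."] else acc)) []
      = pvRender f ms := by
  cases ms with
  | nil => rw [show PySem.List.enumerate ([] : List (Int × Int)) = [] from PySem.List.enumerate_nil 0]; simp [pvRender]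
  | cons p rest =>
    show (PySem.List.enumerate (p :: rest) 0).foldl _ [] = _
    rw [PySem.List.enumerate_cons, List.foldl_cons]
    simp only
    rw [if_neg (by simp : ¬ ((0 : Int) ≠ 0)), PySem.List.foldl_append_singleton_eq_map]
    rw [pvBfold f rest (0 + 1) ([] ++ (PySem.List.pyRange p.1 p.2).map f) (by norm_num)]
    simp [pvRender]

theorem pvMain (src : List String) (radius : Int) (targets : List Int)
    (htpw : targets.Pairwise (· < ·)) :
    (pvOutA src radius targets).1 = pvPartsB src radius targets := by
  obtain ⟨hg, hmem⟩ :=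
    pvMergeStep_inv (src.length : Int) radius targets [] htpw trivial (by simp)
  have hbounds := pvGoodRev_bounds (src.length : Int) _ hg
  have hpwrev := pvGoodRev_pairwise (src.length : Int) _ hg
  have hpwf : (pvMergedB (src.length : Int) radius targets).Pairwise (fun a b => a.2 < b.1) := by
    rw [pvMergedB, List.pairwise_reverse]
    exact hpwrev
  have hne : ∀ p ∈ pvMergedB (src.length : Int) radius targets, p.1 < p.2 := by
    intro p hp
    rw [pvMergedB, List.mem_reverse] at hp
    exact (hbounds p hp).2.1
  have hflat_pw := pvFlat_pairwise _ hpwf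
  have hnodupf : ((pvMergedB (src.length : Int) radius targets).flatMap
      (fun p => PySem.List.pyRange p.1 p.2)).Nodup :=
    hflat_pw.imp (fun h => ne_of_lt h)
  have hvis_nodup : (pvVisibleA src radius targets).Nodup :=
    pvVisible_nodup
      (fun ln => PySem.List.pyRange (max 0 (ln - 1 - radius)) (min (src.length : Int) (ln - 1 + radius + 1)))
      targets PySem.Set.empty List.nodup_nil
  have hvismem : ∀ x : Int, x ∈ pvVisibleA src radius targets ↔
      x ∈ (PySem.Set.empty : PySem.Set Int) ∨
        ∃ ln ∈ targets, x ∈ PySem.List.pyRange (max 0 (ln - 1 - radius)) (min (src.length : Int) (ln - 1 + radius + 1)) :=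
    fun x => pvVisible_mem
      (fun ln => PySem.List.pyRange (max 0 (ln - 1 - radius)) (min (src.length : Int) (ln - 1 + radius + 1)))
      x targets PySem.Set.empty
  have hsv : PySem.List.sorted (pvVisibleA src radius targets) (fun x => x)
      = (pvMergedB (src.length : Int) radius targets).flatMap (fun p => PySem.List.pyRange p.1 p.2) := by
    apply PySem.List.sorted_eq_of_perm_of_pairwise_lt
    · rw [List.perm_ext_iff_of_nodup hnodupf hvis_nodup]
      intro a
      rw [pvMem_flat]
      have h1 : pvMemIv (pvMergedB (src.length : Int) radius targets) a ↔
          pvMemIv (targets.foldl (pvMergeStep (src.length : Int) radius) []) a := by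
        simp [pvMemIv, pvMergedB]
      rw [h1, hmem a, hvismem a]
      constructor
      · rintro (⟨p, hp, _⟩ | ⟨ln, hln, hx⟩)
        · exact absurd hp List.not_mem_nil
        · refine Or.inr ⟨ln, hln, ?_⟩
          rw [PySem.List.mem_pyRange_one]
          omega
      · rintro (h | ⟨ln, hln, hx⟩)
        · exact absurd h List.not_mem_nil
        · rw [PySem.List.mem_pyRange_one] at hx
          exact Or.inr ⟨ln, hln, by omega⟩
    · exact hflat_pw
  unfold pvOutA
  rw [hsv, pvTopA (pvLine src targets) _ hne hpwf]
  unfold pvPartsB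
  rw [pvTopB (pvLine src (PySem.Set.ofList targets)) (pvMergedB (src.length : Int) radius targets)]
  have hline : pvLine src (PySem.Set.ofList targets) = pvLine src targets := by
    funext i
    simp [pvLine, PySem.Set.mem_ofList]
  rw [hline]

theorem format_window_py_spec : Claim_equal_format_window_py := by
  intro src lns radius _
  unfold Spec_format_window_py format_window_py format_window_py_alt
  by_cases h1 : src = []
  · rw [if_pos h1, if_pos h1]
  · rw [if_neg h1, if_neg h1]
    by_cases h2 : pvTargets lns = []
    · rw [if_pos h2, if_pos h2]
    · rw [if_neg h2, if_neg h2, pvMain src radius (pvTargets lns)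
        (PySem.List.sorted_ofList_pairwise_lt _)]
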